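-- pv_equiv track=rewrite | github.com/sebuszqo/AdventOfCode2022 | get_sequence_c.py | get_sequence_c
-- ===== SOURCE A (Python) =====
-- def get_sequence_c(a: list, b: list) -> list:
--     """
--         Function get_sequence_c returns sequence c, that contain all
--         elements from sequence A (maintaining the order) except those,
--         that are present in sequence B p times, where p is a prime number.
--
--         Args:
--         a: list of integers
--         b: list of integers
--
--         Returns:
--         c: list of integers
--     """
--     def is_prime(n: int) -> bool:
--         """
--             Function is_prime, checks if given number is prime or not by using Sieve of Eratosthenes.
--
--             Args:
--             n: integer
--
--             Returns:
--             primes[n]: bool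
--         """
--         if n < 2:
--             return False
--         primes = [True] * (n + 1)
--         primes[0] = primes[1] = False
--         for i in range(2, int(n ** 0.5) + 1):
--             if primes[i]:
--                 for j in range(i ** 2, n + 1, i):
--                     primes[j] = False
--         return primes[n]
--
--     c = []
--     for x in a:
--         if x not in b or not is_prime(b.count(x)):
--             c.append(x)
--     return c
-- ===== SOURCE B (Python) =====
-- def get_sequence_c(a: list, b: list) -> list:
--     """Keep elements of a whose count in b is not prime (order preserved).
--     Sort b once, read off each value's multiplicity as a run length, and
--     collect the values with prime multiplicity into a forbidden set."""
--     def is_prime(n: int) -> bool: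
--         if n < 2:
--             return False
--         primes = [True] * (n + 1)
--         primes[0] = primes[1] = False
--         for i in range(2, int(n ** 0.5) + 1):
--             if primes[i]:
--                 for j in range(i ** 2, n + 1, i):
--                     primes[j] = False
--         return primes[n]
--
--     bs = sorted(b)
--     n = len(bs)
--     forbidden = set()
--     i = 0
--     while i < n:
--         j = i + 1
--         while j < n and bs[j] == bs[i]:
--             j += 1
--         if is_prime(j - i):
--             forbidden.add(bs[i])
--         i = j
--     return [x for x in a if x not in forbidden]
-- ===== Notes on version B (the rewrite author's own statement) =====
-- stated objective: alternative
-- what changed: B sorts b once and reads each value's multiplicity off as a run length in a single scan (one primality test per distinct value), collecting a forbidden set, then filters a by set membership, instead of rescanning b (membership + count) and re-running the sieve for every element of a.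
import Mathlib
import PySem

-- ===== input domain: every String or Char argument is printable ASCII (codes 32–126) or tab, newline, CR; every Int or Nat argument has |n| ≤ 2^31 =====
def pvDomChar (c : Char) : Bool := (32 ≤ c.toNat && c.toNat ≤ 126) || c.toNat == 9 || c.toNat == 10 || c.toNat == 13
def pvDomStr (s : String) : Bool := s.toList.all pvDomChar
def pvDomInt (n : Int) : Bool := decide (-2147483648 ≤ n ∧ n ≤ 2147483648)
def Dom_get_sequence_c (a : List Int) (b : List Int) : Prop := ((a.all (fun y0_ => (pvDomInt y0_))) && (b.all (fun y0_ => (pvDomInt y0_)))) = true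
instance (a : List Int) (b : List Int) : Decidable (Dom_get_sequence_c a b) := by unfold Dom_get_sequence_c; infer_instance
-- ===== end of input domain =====

-- B sorts b once, reads each multiplicity off as a run length (one primality test per distinct
-- value) into a forbidden set, then filters a: a sort-then-scan alternative to A's nested rescans.

-- ===== PORT A =====
-- shared helper: the inner is_prime (identical source text in Source A and Source B).
-- 'int(n ** 0.5)' is ported as Nat.sqrt, exact for the list-count-sized n reached here.
def isPrimeSieve (n : Int) : Bool :=
  if n < 2 then false
  else
    let primes := List.replicate (n.toNat + 1) true
    let primes := PySem.List.pySetD primes 0 false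
    let primes := PySem.List.pySetD primes 1 false
    let primes := (PySem.List.pyRange 2 ((Nat.sqrt n.toNat : Int) + 1) 1).foldl
      (fun p i =>
        if PySem.List.pyGetD p i false then
          (PySem.List.pyRange (i ^ 2) (n + 1) i).foldl (fun q j => PySem.List.pySetD q j false) p
        else p) primes
    PySem.List.pyGetD primes n false

def get_sequence_c (a : List Int) (b : List Int) : List Int :=
  a.foldl (fun c x =>
    if !(decide (x ∈ b)) || !(isPrimeSieve (PySem.List.count b x : Int)) then c ++ [x] else c) []

-- ===== PORT B =====
-- the run-consuming while loop of Source B: each step takes one run of equal values off the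
-- front of the (sorted) list and adds its value to the set when the run length is prime.
def runsForbidden : List Int → PySem.Set Int → PySem.Set Int
  | [], s => s
  | x :: xs, s =>
    let run := xs.takeWhile (fun y => y == x)
    let rest := xs.dropWhile (fun y => y == x)
    runsForbidden rest (if isPrimeSieve ((run.length : Int) + 1) then PySem.Set.add s x else s)
termination_by l _ => l.length
decreasing_by exact Nat.lt_succ_of_le (List.length_dropWhile_le _ _)

def get_sequence_c_alt (a : List Int) (b : List Int) : List Int :=
  let bs := PySem.List.sorted b (fun x => x) false
  let forbidden := runsForbidden bs PySem.Set.empty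
  a.filter (fun x => !(PySem.Set.contains forbidden x))

-- ===== PRECONDITION & SPEC =====
def Spec_get_sequence_c (a : List Int) (b : List Int) (out : List Int) : Prop := out = get_sequence_c_alt a b
instance (a : List Int) (b : List Int) (out : List Int) : Decidable (Spec_get_sequence_c a b out) := by unfold Spec_get_sequence_c; infer_instance

-- ===== CLAIM (what is proved, stated in full; the proofs are below) =====
def Claim_equal_get_sequence_c : Prop := ∀ (a : List Int) (b : List Int), Dom_get_sequence_c a b → Spec_get_sequence_c a b (get_sequence_c a b)

-- ===== LEMMAS AND PROOFS =====

-- On a (≤-)sorted list, runsForbidden computes exactly 'value occurs and its count is prime'.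
theorem head_dropWhile_false {α : Type} (p : α → Bool) :
    ∀ (l : List α) (h : α) (t : List α), l.dropWhile p = h :: t → p h = false := by
  intro l
  induction l with
  | nil => intro h t hd; simp at hd
  | cons a l ih =>
    intro h t hd
    by_cases ha : p a
    · rw [List.dropWhile_cons_of_pos ha] at hd; exact ih _ _ hd
    · rw [List.dropWhile_cons_of_neg ha] at hd
      cases hd; simpa using ha

theorem contains_runsForbidden (l : List Int) (s : PySem.Set Int) (y : Int)
    (hs : l.Pairwise (· ≤ ·)) :
    PySem.Set.contains (runsForbidden l s) y
      = (PySem.Set.contains s y || (decide (y ∈ l) && isPrimeSieve ((l.count y : Int)))) := by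
  induction l, s using runsForbidden.induct with
  | case1 s => simp [runsForbidden]
  | case2 x xs s run rest ih =>
    -- facts about the run decomposition
    have hxs : run ++ rest = xs := List.takeWhile_append_dropWhile
    have hrun : ∀ z ∈ run, z = x := by
      intro z hz
      have := List.mem_takeWhile_imp hz
      simpa using this
    have hxle : ∀ z ∈ xs, x ≤ z := (List.pairwise_cons.mp hs).1
    have hrest_sorted : rest.Pairwise (· ≤ ·) :=
      (List.pairwise_cons.mp hs).2.sublist (List.dropWhile_sublist _)
    have hrest_gt : ∀ z ∈ rest, x < z := by
      intro z hz
      cases hre : rest with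
      | nil => simp [hre] at hz
      | cons h t =>
        have hh : x < h := by
          have hne : (h == x) = false := head_dropWhile_false _ xs h t hre
          have hmem : h ∈ xs := by
            rw [← hxs]; exact List.mem_append_right _ (by simp [hre])
          have := hxle h hmem
          rcases lt_or_eq_of_le this with h1 | h1
          · exact h1
          · simp [← h1] at hne
        rw [hre] at hz
        rcases List.mem_cons.mp hz with rfl | hz
        · exact hh
        · exact lt_of_lt_of_le hh ((List.pairwise_cons.mp (hre ▸ hrest_sorted)).1 z hz)
    have hx_notin_rest : x ∉ rest := fun h => lt_irrefl x (hrest_gt x h)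
    have hcount_run : run.count x = run.length := by
      rw [List.count_eq_length]; intro z hz; exact ((hrun z hz) ▸ rfl)
    have ihh := ih hrest_sorted
    rw [runsForbidden]
    simp only [dite_eq_ite] at ihh
    show (runsForbidden rest (if isPrimeSieve ((run.length : Int) + 1) then PySem.Set.add s x else s)).contains y
      = (s.contains y || (decide (y ∈ x :: xs) && isPrimeSieve ((List.count y (x :: xs) : Int))))
    rw [ihh]
    by_cases hyx : y = x
    · subst hyx
      have hcl : (y :: xs).count y = run.length + 1 := by
        rw [List.count_cons_self, ← hxs, List.count_append,
          List.count_eq_zero.mpr hx_notin_rest, hcount_run]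
      rw [hcl]
      have : decide (y ∈ rest) = false := by simp [hx_notin_rest]
      rw [this]
      push_cast
      by_cases hp : isPrimeSieve ((run.length : Int) + 1)
      · simp [hp, PySem.Set.contains, PySem.Set.mem_add]
      · simp [hp]
    · have hyrun : y ∉ run := fun h => hyx (hrun y h)
      have hcl : List.count y (x :: xs) = List.count y rest := by
        rw [List.count_cons_of_ne (Ne.symm hyx), ← hxs, List.count_append,
          List.count_eq_zero.mpr hyrun]
        omega
      have hmem : (y ∈ x :: xs) ↔ (y ∈ rest) := by
        constructor
        · intro h
          rcases List.mem_cons.mp h with h | h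
          · exact absurd h hyx
          · rw [← hxs] at h
            rcases List.mem_append.mp h with h | h
            · exact absurd (hrun y h) hyx
            · exact h
        · intro h
          exact List.mem_cons_of_mem _ (by rw [← hxs]; exact List.mem_append_right _ h)
      rw [hcl, show decide (y ∈ x :: xs) = decide (y ∈ rest) by simp [hmem]]
      split
      · simp [PySem.Set.contains, PySem.Set.mem_add, hyx]
      · rfl

-- ===== VERDICT (by name: the statement is the Claim_ definition above) =====
theorem get_sequence_c_spec : Claim_equal_get_sequence_c := by
  intro a b _
  unfold Spec_get_sequence_c get_sequence_c get_sequence_c_alt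
  have h := PySem.List.foldl_append_if
    (fun x => !(decide (x ∈ b)) || !(isPrimeSieve (PySem.List.count b x : Int))) (fun x => x) a []
  simp only [List.map_id'] at h
  rw [h]
  simp only [List.nil_append]
  apply List.filter_congr
  intro x _
  rw [contains_runsForbidden _ _ _ (PySem.List.sorted_pairwise b (fun x => x) )]
  have hperm : (PySem.List.sorted b (fun x => x) false).Perm b := PySem.List.sorted_perm b _ _
  rw [hperm.count_eq, PySem.List.count_eq]
  simp only [PySem.Set.contains, PySem.Set.empty]
  by_cases hm : x ∈ b
  · simp [hm, hperm.mem_iff]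
  · simp [hm, hperm.mem_iff]
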